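-- pv_equiv track=rewrite | github.com/devincornell/easytext | easytext/reports.py | count_totals
-- ===== SOURCE A (Python) =====
-- def count_totals(allcts):
--     totals = dict()
--     for cts in allcts:
--         for n,ct in cts.items():
--             if n not in totals.keys():
--                 totals[n] = 0
--             totals[n] += ct
--     return totals
-- ===== SOURCE B (Python) =====
-- def count_totals(allcts):
--     # Transposed decomposition: collect the key universe first (first-seen order),
--     # then compute each key's total with one per-key pass over all dicts.
--     keys = dict.fromkeys(k for cts in allcts for k in cts)
--     return {k: sum(cts.get(k, 0) for cts in allcts) for k in keys}
-- ===== Notes on version B (the rewrite author's own statement) =====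
-- stated objective: alternative
-- what changed: Instead of streaming every (key,count) pair once into an accumulator dict, B first computes the ordered union of all keys and then builds the result by summing cts.get(k,0) over all dicts for each key; Pre_ only states the dict shape (no duplicate keys inside one inner association list), which every real Python dict input satisfies.
import Mathlib
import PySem

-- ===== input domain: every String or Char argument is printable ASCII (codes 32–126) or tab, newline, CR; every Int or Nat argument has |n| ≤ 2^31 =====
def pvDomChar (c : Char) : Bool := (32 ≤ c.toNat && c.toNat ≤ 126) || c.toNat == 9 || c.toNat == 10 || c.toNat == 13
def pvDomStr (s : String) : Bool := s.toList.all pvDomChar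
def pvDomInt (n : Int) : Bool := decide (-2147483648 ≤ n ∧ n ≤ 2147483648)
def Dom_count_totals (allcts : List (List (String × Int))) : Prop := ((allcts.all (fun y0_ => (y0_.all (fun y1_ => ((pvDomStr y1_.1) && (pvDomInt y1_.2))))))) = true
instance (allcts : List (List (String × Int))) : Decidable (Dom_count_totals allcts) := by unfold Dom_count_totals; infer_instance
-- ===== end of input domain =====

-- B transposes the iteration: ordered union of keys first, then one per-key sum over all dicts
-- (same result, alternative decomposition; no speed claim).


-- ===== PORT A =====
-- totals = {}; for cts in allcts: for n, ct in cts.items(): if n not in totals: totals[n] = 0; totals[n] += ct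
def count_totals (allcts : List (List (String × Int))) : List (String × Int) :=
  (allcts.foldl
    (fun (totals : PySem.Dict String Int) cts =>
      cts.foldl
        (fun (totals : PySem.Dict String Int) p =>
          let t := if totals.contains p.1 then totals else totals.insert p.1 0
          t.insert p.1 (t.getD p.1 0 + p.2))
        totals)
    PySem.Dict.empty).items

-- ===== PORT B =====
-- keys = dict.fromkeys(k for cts in allcts for k in cts); {k: sum(cts.get(k, 0) for cts in allcts) for k in keys}
def count_totals_alt (allcts : List (List (String × Int))) : List (String × Int) :=
  let keys := PySem.List.dedup (allcts.flatMap (fun cts => cts.map (·.1)))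
  keys.map (fun k => (k, (allcts.map (fun cts => (PySem.Dict.mk cts).getD k 0)).sum))

-- ===== PRECONDITION & SPEC =====
-- Each inner association list stands for a Python dict, so its keys are distinct; Pre_ states
-- exactly that dict shape (a Python caller cannot pass an inner dict with duplicate keys).
def Pre_count_totals (allcts : List (List (String × Int))) : Prop :=
  ∀ cts ∈ allcts, (cts.map (·.1)).Nodup
instance (allcts : List (List (String × Int))) : Decidable (Pre_count_totals allcts) := by unfold Pre_count_totals; infer_instance
def pvWitness_count_totals : (List (List (String × Int))) := [[("a", 1), ("b", 2)], [("a", 3)]]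
def Spec_count_totals (allcts : List (List (String × Int))) (out : List (String × Int)) : Prop := out = count_totals_alt allcts
instance (allcts : List (List (String × Int))) (out : List (String × Int)) : Decidable (Spec_count_totals allcts out) := by unfold Spec_count_totals; infer_instance

-- ===== CLAIM (what is proved, stated in full; the proofs are below) =====
def Claim_equal_count_totals : Prop := ∀ (allcts : List (List (String × Int))), Dom_count_totals allcts → Pre_count_totals allcts → Spec_count_totals allcts (count_totals allcts)

-- ===== LEMMAS AND PROOFS =====

-- A's loop body, written with the `if n not in totals` guard, is one unconditional insert.
theorem stepA_eq (totals : PySem.Dict String Int) (p : String × Int) :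
    (let t := if totals.contains p.1 then totals else totals.insert p.1 0
     t.insert p.1 (t.getD p.1 0 + p.2))
      = totals.insert p.1 (totals.getD p.1 0 + p.2) := by
  by_cases h : totals.contains p.1
  · simp only [h, if_true]
  · have hc : totals.contains p.1 = false := by simpa using h
    simp only [hc, Bool.false_eq_true, if_false, PySem.Dict.getD_insert_self,
      PySem.Dict.insert_insert_self, zero_add]
    rw [PySem.Dict.getD_of_not_contains (d := totals) (h := hc), zero_add]

-- the nested loop over allcts is the flat loop over all pairs
theorem foldl_flat (allcts : List (List (String × Int)))
    (f : PySem.Dict String Int → (String × Int) → PySem.Dict String Int) (d : PySem.Dict String Int) :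
    allcts.foldl (fun d cts => cts.foldl f d) d = (allcts.flatMap id).foldl f d := by
  induction allcts generalizing d with
  | nil => rfl
  | cons c t ih => simp [List.flatMap_cons, List.foldl_append, ih]

-- each key's final total is its starting value plus the sum of its counts in the stream
theorem getD_foldl_insert_add (l : List (String × Int)) (d : PySem.Dict String Int) (k : String) :
    (l.foldl (fun d p => d.insert p.1 (d.getD p.1 0 + p.2)) d).getD k 0
      = d.getD k 0 + ((l.filter (fun p => p.1 == k)).map (·.2)).sum := by
  induction l generalizing d with
  | nil => simp
  | cons p t ih =>
    simp only [List.foldl_cons, ih, List.filter_cons]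
    by_cases h : p.1 = k
    · subst h; simp [PySem.Dict.getD_insert_self]; ring
    · simp [PySem.Dict.getD_insert, h, Ne.symm h]

-- B's dict lookup, on a duplicate-free association list, is the (singleton-or-empty) filter sum
theorem getD_mk_eq_filter_sum (cts : List (String × Int)) (hnd : (cts.map (·.1)).Nodup) (k : String) :
    (PySem.Dict.mk cts).getD k 0 = ((cts.filter (fun p => p.1 == k)).map (·.2)).sum := by
  induction cts with
  | nil => simp [PySem.Dict.getD_eq_get?_getD, PySem.Dict.get?]
  | cons p t ih =>
    simp only [List.map_cons, List.nodup_cons] at hnd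
    rw [PySem.Dict.getD_eq_get?_getD, PySem.Dict.get?_mk_cons]
    have hb : (p.1 == k) = decide (p.1 = k) := by by_cases hh : p.1 = k <;> simp [hh]
    by_cases h : p.1 = k
    · have ht : t.filter (fun q => q.1 == k) = [] := by
        rw [List.filter_eq_nil_iff]
        intro q hq hb'
        exact hnd.1 (List.mem_map.mpr ⟨q, hq, by simp at hb'; rw [hb', h]⟩)
      simp [h, ht]
    · rw [List.filter_cons]
      simp only [hb, h, decide_false, Bool.false_eq_true, if_false]
      rw [← PySem.Dict.getD_eq_get?_getD]
      exact ih hnd.2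

-- summing the filtered flat stream = summing the per-dict filtered sums
theorem sum_filter_flat (allcts : List (List (String × Int))) (P : String × Int → Bool) :
    ((((allcts.flatMap id).filter P).map (·.2)).sum : Int)
      = (allcts.map (fun c => ((c.filter P).map (·.2)).sum)).sum := by
  induction allcts with
  | nil => rfl
  | cons c t ih => simp [List.flatMap_cons, List.filter_append, Function.comp_def]

theorem count_totals_eq (allcts : List (List (String × Int))) (h : Pre_count_totals allcts) :
    count_totals allcts = count_totals_alt allcts := by
  unfold count_totals count_totals_alt
  have hstep : (fun (totals : PySem.Dict String Int) (p : String × Int) =>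
      let t := if totals.contains p.1 then totals else totals.insert p.1 0
      t.insert p.1 (t.getD p.1 0 + p.2))
      = fun totals p => totals.insert p.1 (totals.getD p.1 0 + p.2) := by
    funext totals p; exact stepA_eq totals p
  rw [hstep, foldl_flat]
  set pairs := allcts.flatMap id with hpairs
  set D := pairs.foldl (fun d p => d.insert p.1 (d.getD p.1 0 + p.2)) PySem.Dict.empty with hD
  have hnd : D.keys.Nodup := by
    rw [hD]
    exact PySem.Dict.nodup_keys_foldl_insert_key pairs (·.1)
      (fun d x => d.getD x.1 0 + x.2) PySem.Dict.empty (by simp)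
  have hkeys : D.keys = PySem.List.dedup (allcts.flatMap (fun cts => cts.map (·.1))) := by
    rw [hD, PySem.Dict.keys_foldl_insert_key]
    simp [PySem.Set.update_nil_left, hpairs, List.flatMap_def]
  rw [PySem.Dict.items_eq_map_keys D hnd 0, hkeys]
  refine List.map_congr_left (fun k _ => ?_)
  have hB : (allcts.map (fun cts => (PySem.Dict.mk cts).getD k 0)).sum
      = (allcts.map (fun c => ((c.filter (fun p => p.1 == k)).map (·.2)).sum)).sum := by
    congr 1
    exact List.map_congr_left (fun cts hc => getD_mk_eq_filter_sum cts (h cts hc) k)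
  rw [hB, ← sum_filter_flat, hD, getD_foldl_insert_add, PySem.Dict.getD_empty, zero_add, hpairs]

-- ===== VERDICT (by name: the statement is the Claim_ definition above) =====
theorem count_totals_spec : Claim_equal_count_totals := by
  intro allcts _ hpre
  unfold Spec_count_totals
  exact count_totals_eq allcts hpre
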